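-- pv_equiv track=rewrite | github.com/citizen75/cresus | src/agents/entry_order/agent.py | _count_execution_methods
-- ===== SOURCE A (Python) =====
-- from typing import Any, Dict, Optional
--
-- def _count_execution_methods(orders: list) -> Dict[str, int]:
-- 	"""Count orders by execution method.
--
-- 	Args:
-- 		orders: List of executable orders
--
-- 	Returns:
-- 		Dict with counts by method
-- 	"""
-- 	counts = {
-- 		"market": 0,
-- 		"limit": 0,
-- 		"scale_in": 0,
-- 	}
--
-- 	for order in orders:
-- 		method = order.get("execution_method", "market")
-- 		if method in counts:
-- 			counts[method] += 1
--
-- 	return counts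
-- ===== SOURCE B (Python) =====
-- def _count_execution_methods(orders: list):
-- 	"""Count orders by execution method: one counting pass per fixed key, no mutable counter."""
-- 	return {
-- 		k: sum(1 for order in orders if order.get("execution_method", "market") == k)
-- 		for k in ("market", "limit", "scale_in")
-- 	}
-- ===== Notes on version B (the rewrite author's own statement) =====
-- stated objective: alternative
-- what changed: B keeps no mutable counter at all: for each of the three fixed keys it runs a separate counting pass (sum of matching orders), whereas A threads one dict accumulator through a single guarded loop.
import Mathlib
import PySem

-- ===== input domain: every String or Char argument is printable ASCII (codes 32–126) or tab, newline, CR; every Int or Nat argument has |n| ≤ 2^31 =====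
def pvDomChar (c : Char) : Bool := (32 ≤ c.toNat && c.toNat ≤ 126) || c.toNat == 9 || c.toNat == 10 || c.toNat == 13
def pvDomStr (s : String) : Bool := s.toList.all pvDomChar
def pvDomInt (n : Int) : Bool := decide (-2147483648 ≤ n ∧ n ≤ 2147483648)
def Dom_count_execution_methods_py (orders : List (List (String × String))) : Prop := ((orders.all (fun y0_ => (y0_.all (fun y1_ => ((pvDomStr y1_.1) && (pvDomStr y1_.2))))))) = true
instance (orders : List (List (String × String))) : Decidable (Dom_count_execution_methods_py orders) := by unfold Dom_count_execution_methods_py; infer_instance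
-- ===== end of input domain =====

-- B keeps no mutable counter: one separate counting pass per fixed key; A threads a guarded dict accumulator through one loop.

-- ===== PORT A =====
-- order.get("execution_method", "market")
def pvMethod (order : List (String × String)) : String :=
  (PySem.Dict.mk order).getD "execution_method" "market"

def count_execution_methods_py (orders : List (List (String × String))) : List (String × Int) :=
  let counts : PySem.Dict String Int :=
    PySem.Dict.ofList [("market", 0), ("limit", 0), ("scale_in", 0)]
  let counts := orders.foldl (fun counts order =>
    let method := pvMethod order
    if counts.contains method then counts.modify method 0 (· + 1) else counts) counts
  counts.items

-- ===== PORT B =====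
-- sum(1 for order in orders if order.get("execution_method", "market") == k), for each fixed k
def count_execution_methods_py_alt (orders : List (List (String × String))) : List (String × Int) :=
  ["market", "limit", "scale_in"].map (fun k =>
    (k, orders.foldl (fun s order => if pvMethod order == k then s + 1 else s) (0 : Int)))

-- ===== PRECONDITION & SPEC =====
def Spec_count_execution_methods_py (orders : List (List (String × String))) (out : List (String × Int)) : Prop := out = count_execution_methods_py_alt orders
instance (orders : List (List (String × String))) (out : List (String × Int)) : Decidable (Spec_count_execution_methods_py orders out) := by unfold Spec_count_execution_methods_py; infer_instance

-- ===== CLAIM (what is proved, stated in full; the proofs are below) =====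
def Claim_equal_count_execution_methods_py : Prop := ∀ (orders : List (List (String × String))), Dom_count_execution_methods_py orders → Spec_count_execution_methods_py orders (count_execution_methods_py orders)

-- ===== LEMMAS AND PROOFS =====

-- A's guarded loop: a key already present keeps its count = old + #occurrences.
theorem pvA_getD (l : List (List (String × String))) (d : PySem.Dict String Int) (k : String)
    (hk : d.contains k = true) :
    (l.foldl (fun c o => if c.contains (pvMethod o) then c.modify (pvMethod o) 0 (· + 1) else c) d).getD k 0
      = d.getD k 0 + ((l.map pvMethod).count k : Int) := by
  induction l generalizing d with
  | nil => simp
  | cons o t ih =>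
    simp only [List.foldl_cons, List.map_cons]
    by_cases hm : pvMethod o = k
    · subst hm
      rw [if_pos hk, ih _ (by simp [PySem.Dict.contains_modify, hk])]
      simp [PySem.Dict.getD_modify_self]
      ring
    · have h2 : ∀ c : PySem.Dict String Int, c.contains k = true →
        (if c.contains (pvMethod o) then c.modify (pvMethod o) 0 (· + 1) else c).getD k 0 = c.getD k 0 := by
        intro c _; split
        · rw [PySem.Dict.getD_modify, if_neg (Ne.symm hm)]
        · rfl
      have hk' : (if d.contains (pvMethod o) then d.modify (pvMethod o) 0 (· + 1) else d).contains k = true := by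
        split
        · simp [PySem.Dict.contains_modify, hk]
        · exact hk
      rw [ih _ hk', h2 d hk]
      simp [hm]

-- A's guarded loop never changes the key list.
theorem pvA_keys (l : List (List (String × String))) (d : PySem.Dict String Int) :
    (l.foldl (fun c o => if c.contains (pvMethod o) then c.modify (pvMethod o) 0 (· + 1) else c) d).keys
      = d.keys := by
  induction l generalizing d with
  | nil => rfl
  | cons o t ih =>
    simp only [List.foldl_cons]
    rw [ih]
    split
    · rename_i h
      simp [PySem.Dict.keys_modify, PySem.Dict.keys_insert_of_contains, h]
    · rfl

-- B's per-key counting fold equals the number of occurrences of k among the method values.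
theorem pvB_count (l : List (List (String × String))) (k : String) (s : Int) :
    l.foldl (fun s o => if pvMethod o == k then s + 1 else s) s
      = s + ((l.map pvMethod).count k : Int) := by
  induction l generalizing s with
  | nil => simp
  | cons o t ih =>
    simp only [List.foldl_cons, List.map_cons]
    by_cases hm : pvMethod o = k
    · rw [if_pos (by simp [hm]), ih, List.count_cons, if_pos (by simp [hm])]
      push_cast; ring
    · rw [if_neg (by simp [hm]), ih, List.count_cons, if_neg (by simp [hm])]
      simp

theorem count_execution_methods_eq (orders : List (List (String × String))) :
    count_execution_methods_py orders = count_execution_methods_py_alt orders := by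
  unfold count_execution_methods_py count_execution_methods_py_alt
  set d0 : PySem.Dict String Int := PySem.Dict.ofList [("market", 0), ("limit", 0), ("scale_in", 0)] with hd0
  set f := fun (c : PySem.Dict String Int) (o : List (String × String)) =>
    if c.contains (pvMethod o) then c.modify (pvMethod o) 0 (· + 1) else c with hf
  have hkeys : (orders.foldl f d0).keys = ["market", "limit", "scale_in"] := by
    rw [hf]; rw [pvA_keys]; decide
  have hnd : (orders.foldl f d0).keys.Nodup := by rw [hkeys]; decide
  rw [PySem.Dict.items_eq_map_keys _ hnd 0, hkeys]
  apply List.map_congr_left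
  intro k hk
  have hc : d0.contains k = true := by fin_cases hk <;> decide
  have hA : (orders.foldl f d0).getD k 0 = d0.getD k 0 + ((orders.map pvMethod).count k : Int) := by
    rw [hf]; exact pvA_getD orders d0 k hc
  rw [hA, pvB_count]
  have hz : d0.getD k 0 = 0 := by fin_cases hk <;> decide
  rw [hz]

-- ===== VERDICT (by name: the statement is the Claim_ definition above) =====
theorem count_execution_methods_py_spec : Claim_equal_count_execution_methods_py := by
  intro orders _
  unfold Spec_count_execution_methods_py
  exact count_execution_methods_eq orders
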